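-- pv_equiv track=rewrite | github.com/vishal-CS24/1-month-preprattionkit | largest row or column.py | largetColSumAndIndex
-- ===== SOURCE A (Python) =====
-- def largetColSumAndIndex(li):
--     n = len(li)
--     m = len(li[0])
--
--     max_sum = -2147483648
--     max_index = -2147483648
--
--     for j in range(m):
--         sum = 0
--         for i in range(n):
--             sum += li[i][j]
--
--         if sum > max_sum:
--             max_index = j
--             max_sum = sum
--
--     return max_index, max_sum
-- ===== SOURCE B (Python) =====
-- def largetColSumAndIndex(li):
--     # Two-pass, row-major: accumulate column sums, then select the max (first-wins).
--     m = len(li[0])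
--     col_sums = [0] * m
--     for row in li:
--         col_sums = [c + v for c, v in zip(col_sums, row)]
--     max_sum = -2147483648
--     max_index = -2147483648
--     for j, s in enumerate(col_sums):
--         if s > max_sum:
--             max_sum = s
--             max_index = j
--     return max_index, max_sum
-- ===== Notes on version B (the rewrite author's own statement) =====
-- stated objective: alternative
-- what changed: Replaces A's fused column-major double loop (recomputing each column sum by indexing li[i][j]) with a two-pass row-major decomposition: one pass accumulating a col_sums vector via zip, then a separate first-wins strict-> selection pass over enumerate(col_sums).
import Mathlib
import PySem

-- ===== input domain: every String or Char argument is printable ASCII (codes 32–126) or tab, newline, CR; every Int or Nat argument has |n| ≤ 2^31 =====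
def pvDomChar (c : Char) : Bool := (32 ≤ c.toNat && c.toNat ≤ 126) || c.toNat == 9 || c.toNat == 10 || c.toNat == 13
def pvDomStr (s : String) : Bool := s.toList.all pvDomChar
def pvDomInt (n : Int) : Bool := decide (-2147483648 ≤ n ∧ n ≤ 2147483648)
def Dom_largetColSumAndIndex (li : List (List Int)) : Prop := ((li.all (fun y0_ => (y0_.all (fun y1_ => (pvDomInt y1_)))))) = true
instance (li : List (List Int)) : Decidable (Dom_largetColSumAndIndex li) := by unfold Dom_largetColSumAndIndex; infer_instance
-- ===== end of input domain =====

-- B replaces A's fused column-major double loop by a two-pass row-major accumulation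
-- (column-sum vector, then a separate first-wins selection pass); same cost, alternative structure.

-- ===== PORT A =====
def largetColSumAndIndex (li : List (List Int)) : Int × Int :=
  let n : Int := PySem.List.len li
  let m : Int := PySem.List.len (PySem.List.pyGetD li 0 [])
  let st := (PySem.List.pyRange 0 m 1).foldl
    (fun (acc : Int × Int) j =>
      let s := (PySem.List.pyRange 0 n 1).foldl
        (fun s i => s + PySem.List.pyGetD (PySem.List.pyGetD li i []) j 0) 0
      if s > acc.1 then (s, j) else acc)
    (-2147483648, -2147483648)
  (st.2, st.1)

-- ===== PORT B =====
def largetColSumAndIndex_alt (li : List (List Int)) : Int × Int :=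
  let m : Int := PySem.List.len (PySem.List.pyGetD li 0 [])
  let colSums := li.foldl (fun cs row => List.zipWith (· + ·) cs row) (List.replicate m.toNat (0 : Int))
  let st := (PySem.List.enumerate colSums 0).foldl
    (fun (acc : Int × Int) p => if p.2 > acc.1 then (p.2, p.1) else acc)
    (-2147483648, -2147483648)
  (st.2, st.1)

-- ===== PRECONDITION & SPEC =====
-- Pre_ excludes exactly the inputs on which A raises IndexError: empty li (li[0])
-- and ragged inputs with some row shorter than the first row (li[i][j]).
def Pre_largetColSumAndIndex (li : List (List Int)) : Prop :=
  li ≠ [] ∧ ∀ row ∈ li, li.headI.length ≤ row.length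
instance (li : List (List Int)) : Decidable (Pre_largetColSumAndIndex li) := by
  unfold Pre_largetColSumAndIndex; infer_instance
def pvWitness_largetColSumAndIndex : List (List Int) := [[1, 2], [3, 4]]
def Spec_largetColSumAndIndex (li : List (List Int)) (out : Int × Int) : Prop := out = largetColSumAndIndex_alt li
instance (li : List (List Int)) (out : Int × Int) : Decidable (Spec_largetColSumAndIndex li out) := by unfold Spec_largetColSumAndIndex; infer_instance

-- ===== CLAIM (what is proved, stated in full; the proofs are below) =====
def Claim_equal_largetColSumAndIndex : Prop := ∀ (li : List (List Int)), Dom_largetColSumAndIndex li → Pre_largetColSumAndIndex li → Spec_largetColSumAndIndex li (largetColSumAndIndex li)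

-- ===== LEMMAS AND PROOFS =====

theorem pv_foldl_zip_len (li : List (List Int)) (cs : List Int)
    (h : ∀ row ∈ li, cs.length ≤ row.length) :
    (li.foldl (fun cs row => List.zipWith (· + ·) cs row) cs).length = cs.length := by
  induction li generalizing cs with
  | nil => rfl
  | cons r rs ih =>
    have h1 : cs.length ≤ r.length := h r (List.mem_cons_self ..)
    have hz : (List.zipWith (· + ·) cs r).length = cs.length := by
      simp [List.length_zipWith]; omega
    simp only [List.foldl_cons]
    rw [ih _ (by intro row hrow; rw [hz]; exact h row (List.mem_cons_of_mem _ hrow)), hz]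

theorem pv_foldl_zip_get (li : List (List Int)) (cs : List Int)
    (h : ∀ row ∈ li, cs.length ≤ row.length) (j : Nat) (hj : j < cs.length) :
    (li.foldl (fun cs row => List.zipWith (· + ·) cs row) cs).getD j 0 =
      cs.getD j 0 + (li.map (fun row => row.getD j 0)).sum := by
  induction li generalizing cs with
  | nil => simp
  | cons r rs ih =>
    have h1 : cs.length ≤ r.length := h r (List.mem_cons_self ..)
    have hz : (List.zipWith (· + ·) cs r).length = cs.length := by
      simp [List.length_zipWith]; omega
    simp only [List.foldl_cons, List.map_cons, List.sum_cons]
    rw [ih _ (by intro row hrow; rw [hz]; exact h row (List.mem_cons_of_mem _ hrow)) (by omega)]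
    have hjr : j < r.length := by omega
    rw [List.getD_eq_getElem _ _ (by omega : j < (List.zipWith (· + ·) cs r).length),
        List.getElem_zipWith, ← List.getD_eq_getElem _ _ hj, ← List.getD_eq_getElem _ _ hjr]
    ring

theorem largetColSumAndIndex_spec : Claim_equal_largetColSumAndIndex := by
  intro li _ hpre
  obtain ⟨hne, hrows⟩ := hpre
  have hhead : PySem.List.pyGetD li 0 [] = li.headI := by
    cases li with
    | nil => exact absurd rfl hne
    | cons r rs =>
      have h0 := PySem.List.pyGetD_natCast (r :: rs) 0 []
      rw [show ((0 : Nat) : Int) = (0 : Int) by norm_num] at h0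
      rw [h0]; rfl
  unfold Spec_largetColSumAndIndex largetColSumAndIndex largetColSumAndIndex_alt
  simp only [hhead, PySem.List.len_eq, Int.toNat_natCast]
  set m : Nat := li.headI.length with hm
  set cs : List Int := li.foldl (fun cs row => List.zipWith (· + ·) cs row) (List.replicate m (0 : Int)) with hcs
  have hrep : ∀ row ∈ li, (List.replicate m (0 : Int)).length ≤ row.length := by
    intro row hrow; simpa using hrows row hrow
  have hcslen : cs.length = m := by
    rw [hcs, pv_foldl_zip_len li _ hrep, List.length_replicate]
  have hcsget : ∀ j : Nat, j < m → cs.getD j 0 = (li.map (fun row => row.getD j 0)).sum := by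
    intro j hj
    rw [hcs, pv_foldl_zip_get li _ hrep j (by simpa using hj)]
    simp
  have key : (PySem.List.pyRange 0 (m : Int)).foldl
      (fun (acc : Int × Int) j =>
        let s := (PySem.List.pyRange 0 (li.length : Int)).foldl
          (fun s i => s + PySem.List.pyGetD (PySem.List.pyGetD li i []) j 0) 0
        if s > acc.1 then (s, j) else acc) (-2147483648, -2147483648)
      = (PySem.List.enumerate cs).foldl
        (fun (acc : Int × Int) p => if p.2 > acc.1 then (p.2, p.1) else acc) (-2147483648, -2147483648) := by
    rw [PySem.List.enumerate_eq_map_pyRange cs 0, List.foldl_map, PySem.List.len_eq, hcslen]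
    apply PySem.List.foldl_congr_mem
    intro acc j hjmem
    obtain ⟨hj0, hjm⟩ := PySem.List.mem_pyRange_one.mp hjmem
    have hinner : (PySem.List.pyRange 0 (li.length : Int)).foldl
        (fun s i => s + PySem.List.pyGetD (PySem.List.pyGetD li i []) j 0) 0
        = PySem.List.pyGetD cs j 0 := by
      rw [← PySem.List.len_eq,
        PySem.List.foldl_pyRange_zero_pyGetD li [] (fun s row => s + PySem.List.pyGetD row j 0) 0,
        PySem.List.foldl_add, PySem.List.pyGetD_of_nonneg cs 0 hj0,
        hcsget j.toNat (by omega)]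
      have : ∀ row ∈ li, PySem.List.pyGetD row j 0 = row.getD j.toNat 0 := by
        intro row _; exact PySem.List.pyGetD_of_nonneg row 0 hj0
      rw [List.map_congr_left this]
      simp
    simp only [hinner]
  rw [key]
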